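-- pv_equiv track=rewrite | github.com/choi-yh/TIL | algorithm/프로그래머스/2/87390. n＾2 배열 자르기/n＾2 배열 자르기.py | solution
-- ===== SOURCE A (Python) =====
-- def solution(n, left, right):
--     # n * k + a = left -> k = (left - a) / k
--     left_row = left // n
--     left_col = left - n * left_row
--
--     right_row = right // n
--     right_col = right - n * right_row
--
--     answer = []
--     for row in range(left_row, right_row + 1):
--         add_row = [row + 1] * (row + 1) + [i for i in range(row + 2, n + 1)]
--         answer += add_row
--
--     if right_col - n + 1 == 0:
--         return answer[left_col:]
--
--     return answer[left_col: right_col - n + 1]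
-- ===== SOURCE B (Python) =====
-- def solution(n, left, right):
--     return [max(i // n, i % n) + 1 for i in range(left, right + 1)]
-- ===== Notes on version B (the rewrite author's own statement) =====
-- stated objective: faster
-- what changed: B replaces A's row-by-row materialisation of whole n-wide rows followed by slicing with a closed-form value max(i//n, i%n)+1 computed directly for each index in range(left, right+1).
-- outside the precondition, e.g. on solution(-3, 0, 2): A returns [], B returns [1, 0, 0]; on solution(1, -2, 0): A returns [0, 1, 1, 1], B returns [1, 1, 1]; on solution(3, 0, 9): A returns [1, 2, 3, 2, 2, 3, 3, 3, 3, 4, 4], B returns [1, 2, 3, 2, 2, 3, 3, 3, 3, 4]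
import Mathlib
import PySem

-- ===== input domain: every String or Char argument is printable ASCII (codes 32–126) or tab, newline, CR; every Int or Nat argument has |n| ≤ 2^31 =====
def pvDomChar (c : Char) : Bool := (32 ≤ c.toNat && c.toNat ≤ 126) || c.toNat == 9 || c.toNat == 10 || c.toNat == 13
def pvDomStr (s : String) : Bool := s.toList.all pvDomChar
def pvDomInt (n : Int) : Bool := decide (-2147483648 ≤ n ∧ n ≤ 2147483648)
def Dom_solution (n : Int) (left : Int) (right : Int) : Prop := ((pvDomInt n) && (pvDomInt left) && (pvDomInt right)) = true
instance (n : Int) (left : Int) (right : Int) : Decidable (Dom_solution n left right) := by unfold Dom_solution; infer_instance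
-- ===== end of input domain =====

-- B computes each entry directly by the closed form max(i//n, i%n)+1 instead of materialising whole rows and slicing.

-- ===== PORT A =====
def solution (n : Int) (left : Int) (right : Int) : List Int :=
  let left_row := PySem.Int.floordiv left n
  let left_col := left - n * left_row
  let right_row := PySem.Int.floordiv right n
  let right_col := right - n * right_row
  let answer := (PySem.List.pyRange left_row (right_row + 1) 1).foldl
    (fun acc row =>
      acc ++ (PySem.List.pyRepeat [row + 1] (row + 1) ++ PySem.List.pyRange (row + 2) (n + 1) 1)) []
  if right_col - n + 1 == 0 then
    PySem.List.slice answer (some left_col) none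
  else
    PySem.List.slice answer (some left_col) (some (right_col - n + 1))

-- ===== PORT B =====
def solution_alt (n : Int) (left : Int) (right : Int) : List Int :=
  (PySem.List.pyRange left (right + 1) 1).map
    (fun i => max (PySem.Int.floordiv i n) (PySem.Int.mod i n) + 1)

-- ===== PRECONDITION & SPEC =====
-- Pre_ admits the problem's stated domain (1 ≤ n, 0 ≤ left ≤ right < n²), widened to every other
-- input region where A's value is still the intended flattened slice (left down to -n, any
-- left/right order, and the empty-result regions right < left with left//n > right//n, and
-- negative n with all rows between n-1 and -1); outside it A's value is accidental
-- (n = 0 raises ZeroDivisionError; left < -n or right ≥ n*n make A emit entries of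
-- misaligned rows outside the n×n array, and other negative-n inputs slice garbage rows).
def Pre_solution (n : Int) (left : Int) (right : Int) : Prop :=
  (1 ≤ n ∧ -n ≤ left ∧ right < n * n)
  ∨ (right < left ∧ PySem.Int.floordiv right n < PySem.Int.floordiv left n)
  ∨ (n ≤ -1 ∧ right < left ∧ n - 1 ≤ PySem.Int.floordiv left n ∧ PySem.Int.floordiv right n ≤ -1)
instance (n : Int) (left : Int) (right : Int) : Decidable (Pre_solution n left right) := by unfold Pre_solution; infer_instance

def pvWitness_solution : Int × Int × Int := (3, 2, 7)

def Spec_solution (n : Int) (left : Int) (right : Int) (out : List Int) : Prop := out = solution_alt n left right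
instance (n : Int) (left : Int) (right : Int) (out : List Int) : Decidable (Spec_solution n left right out) := by unfold Spec_solution; infer_instance

-- ===== CLAIM (what is proved, stated in full; the proofs are below) =====
def Claim_equal_solution : Prop := ∀ (n : Int) (left : Int) (right : Int), Dom_solution n left right → Pre_solution n left right → Spec_solution n left right (solution n left right)

-- ===== LEMMAS AND PROOFS =====

-- floor-division and mod of an in-block index: (r*n + j) // n = r and (r*n + j) % n = j.
theorem pv_block_divmod (n r j : Int) (hn : 0 < n) (h0 : 0 ≤ j) (hj : j < n) :
    PySem.Int.floordiv (r * n + j) n = r ∧ PySem.Int.mod (r * n + j) n = j := by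
  constructor
  · show (r * n + j).fdiv n = r
    rw [Int.fdiv_eq_ediv, if_pos (Or.inl (le_of_lt hn)), sub_zero, add_comm,
      Int.add_mul_ediv_right _ _ (ne_of_gt hn), Int.ediv_eq_zero_of_lt h0 hj, zero_add]
  · show (r * n + j).fmod n = j
    rw [Int.fmod_eq_emod, if_pos (Or.inl (le_of_lt hn)), add_zero, add_comm, mul_comm r n,
      Int.add_mul_emod_self_left, Int.emod_eq_of_lt h0 hj]

-- one materialised row of A equals the closed form over its block of flat indices
theorem pv_row_eq (n r : Int) (hn : 1 ≤ n) (h0 : -1 ≤ r) (hr : r < n) :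
    PySem.List.pyRepeat [r + 1] (r + 1) ++ PySem.List.pyRange (r + 2) (n + 1) 1
      = (PySem.List.pyRange (r * n) (r * n + n) 1).map
          (fun i => max (PySem.Int.floordiv i n) (PySem.Int.mod i n) + 1) := by
  have hrn : r * n + n - r * n = n := by ring
  rw [PySem.List.pyRepeat_singleton]
  apply List.ext_getElem
  · simp only [List.length_append, List.length_replicate, PySem.List.length_pyRange_one,
      List.length_map, hrn]
    omega
  · intro i h1 h2
    have hin : (i : Int) < n := by
      simp only [List.length_map, PySem.List.length_pyRange_one, hrn] at h2
      omega
    simp only [List.getElem_map, PySem.List.getElem_pyRange_one]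
    obtain ⟨hq, hm⟩ := pv_block_divmod n r (i : Int) (by omega) (Int.natCast_nonneg i) hin
    rw [hq, hm]
    by_cases hi : i < (r + 1).toNat
    · rw [List.getElem_append_left (by simpa using hi), List.getElem_replicate,
        max_eq_left (show (i : Int) ≤ r by omega)]
    · rw [List.getElem_append_right (by simpa using not_lt.mp hi),
        PySem.List.getElem_pyRange_one, max_eq_right (show r ≤ (i : Int) by simp at hi; omega)]
      simp only [List.length_replicate]
      omega

theorem pv_blocks_eq (n : Int) (F : Int → Int) (hn : 0 ≤ n) : ∀ (k : Nat) (a : Int),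
    (PySem.List.pyRange a (a + (k : Int)) 1).flatMap
        (fun r => (PySem.List.pyRange (r * n) (r * n + n) 1).map F)
      = (PySem.List.pyRange (a * n) ((a + (k : Int)) * n) 1).map F := by
  intro k
  induction k with
  | zero =>
    intro a
    rw [show a + ((0 : Nat) : Int) = a by simp, PySem.List.pyRange_one_eq_nil (le_refl a),
      PySem.List.pyRange_one_eq_nil (le_refl (a * n))]
    simp
  | succ k ih =>
    intro a
    have hb : a + (((k + 1) : Nat) : Int) = a + 1 + (k : Int) := by push_cast; ring
    have h1 : a * n ≤ (a + 1) * n := by nlinarith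
    have h2 : (a + 1) * n ≤ (a + 1 + (k : Int)) * n := by
      nlinarith [mul_nonneg (Int.natCast_nonneg k) hn]
    rw [hb, PySem.List.pyRange_one_cons (show a < a + 1 + (k : Int) by omega),
      List.flatMap_cons, ih (a + 1), show a * n + n = (a + 1) * n from by ring,
      PySem.List.pyRange_one_append (a * n) ((a + 1) * n) ((a + 1 + (k : Int)) * n) h1 h2,
      List.map_append]

theorem pv_drop_map_pyRange (F : Int → Int) (a b : Int) (k : Nat) :
    ((PySem.List.pyRange a b 1).map F).drop k
      = (PySem.List.pyRange (a + (k : Int)) b 1).map F := by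
  apply List.ext_getElem
  · simp only [List.length_drop, List.length_map, PySem.List.length_pyRange_one]
    omega
  · intro i h1 h2
    simp only [List.getElem_drop, List.getElem_map, PySem.List.getElem_pyRange_one]
    congr 1
    push_cast
    ring

theorem pv_take_map_pyRange (F : Int → Int) (a b : Int) (k : Nat) :
    ((PySem.List.pyRange a b 1).map F).take k
      = (PySem.List.pyRange a (min (a + (k : Int)) b) 1).map F := by
  apply List.ext_getElem
  · simp only [List.length_take, List.length_map, PySem.List.length_pyRange_one]
    omega
  · intro i h1 h2
    simp only [List.getElem_take, List.getElem_map, PySem.List.getElem_pyRange_one]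

theorem pv_pyRange_eq_of (a b a' b' : Int)
    (h : (a = a' ∧ b = b') ∨ (b ≤ a ∧ b' ≤ a')) :
    PySem.List.pyRange a b 1 = PySem.List.pyRange a' b' 1 := by
  rcases h with ⟨h1, h2⟩ | ⟨h1, h2⟩
  · rw [h1, h2]
  · rw [PySem.List.pyRange_one_eq_nil h1, PySem.List.pyRange_one_eq_nil h2]

-- ===== VERDICT (by name: the statement is the Claim_ definition above) =====
theorem solution_spec : Claim_equal_solution := by
  unfold Claim_equal_solution
  intro n left right _ hpre
  unfold Spec_solution
  simp only [solution, solution_alt]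
  rcases hpre with ⟨hn, hnl, hr⟩ | ⟨hrl, hqq⟩ | ⟨hn3, hrl, hlo, hhi⟩
  case inr.inl =>
    -- empty query spanning no row: right < left and right//n < left//n, so A builds no rows
    rw [PySem.List.pyRange_one_eq_nil (Int.lt_iff_add_one_le.mp hqq), List.foldl_nil,
      PySem.List.pyRange_one_eq_nil (show right + 1 ≤ left by omega)]
    split <;> simp [PySem.List.slice]
  case inr.inr =>
    -- negative n with every row between n-1 and -1: every materialised row is empty
    rw [PySem.List.foldl_append_eq_flatMap, List.nil_append]
    have hz : (PySem.List.pyRange (PySem.Int.floordiv left n) (PySem.Int.floordiv right n + 1) 1).flatMap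
        (fun row => PySem.List.pyRepeat [row + 1] (row + 1) ++ PySem.List.pyRange (row + 2) (n + 1) 1)
        = [] := by
      rw [List.flatMap_eq_nil_iff]
      intro r hm
      rw [PySem.List.mem_pyRange_one] at hm
      have hr1 : r + 1 ≤ 0 := by linarith [hm.2]
      have hr2 : n + 1 ≤ r + 2 := by linarith [hm.1]
      rw [PySem.List.pyRepeat_singleton, Int.toNat_of_nonpos hr1, List.replicate_zero,
        PySem.List.pyRange_one_eq_nil hr2]
      simp
    rw [hz, PySem.List.pyRange_one_eq_nil (show right + 1 ≤ left by omega)]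
    split <;> simp [PySem.List.slice]
  have hn0 : (0 : Int) < n := by omega
  have hfdl : PySem.Int.floordiv left n = left / n := by
    show left.fdiv n = left / n
    rw [Int.fdiv_eq_ediv, if_pos (Or.inl (le_of_lt hn0)), sub_zero]
  have hfdr : PySem.Int.floordiv right n = right / n := by
    show right.fdiv n = right / n
    rw [Int.fdiv_eq_ediv, if_pos (Or.inl (le_of_lt hn0)), sub_zero]
  rw [hfdl, hfdr]
  have hlml : left - n * (left / n) = left % n := by rw [Int.emod_def]
  have hlmr : right - n * (right / n) = right % n := by rw [Int.emod_def]
  rw [hlml, hlmr]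
  set lr := left / n with hlrdef
  set rr := right / n with hrrdef
  set lc := left % n with hlcdef
  set rc := right % n with hrcdef
  have hlc0 : 0 ≤ lc := Int.emod_nonneg left (ne_of_gt hn0)
  have hlcn : lc < n := Int.emod_lt_of_pos left hn0
  have hrc0 : 0 ≤ rc := Int.emod_nonneg right (ne_of_gt hn0)
  have hrcn : rc < n := Int.emod_lt_of_pos right hn0
  have hlid : n * lr + lc = left := Int.mul_ediv_add_emod left n
  have hrid : n * rr + rc = right := Int.mul_ediv_add_emod right n
  have hlr0 : -1 ≤ lr := by
    have h := Int.ediv_le_ediv hn0 hnl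
    rwa [show -n = n * (-1) by ring, Int.mul_ediv_cancel_left _ (ne_of_gt hn0)] at h
  have hrrn : rr < n := by
    have h1 : n * rr < n * n := by linarith
    exact lt_of_mul_lt_mul_left h1 (le_of_lt hn0)
  set F := (fun i => max (PySem.Int.floordiv i n) (PySem.Int.mod i n) + 1) with hF
  rw [PySem.List.foldl_append_eq_flatMap, List.nil_append]
  have hflat : (PySem.List.pyRange lr (rr + 1) 1).flatMap
      (fun row => PySem.List.pyRepeat [row + 1] (row + 1) ++ PySem.List.pyRange (row + 2) (n + 1) 1)
      = (PySem.List.pyRange lr (rr + 1) 1).flatMap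
        (fun r => (PySem.List.pyRange (r * n) (r * n + n) 1).map F) := by
    apply List.flatMap_congr
    intro r hrmem
    rw [PySem.List.mem_pyRange_one] at hrmem
    exact pv_row_eq n r hn (by omega) (by omega)
  rw [hflat]
  by_cases hcase : lr ≤ rr
  · have hk : rr + 1 = lr + (((rr + 1 - lr).toNat : Nat) : Int) := by omega
    have hblocks : (PySem.List.pyRange lr (rr + 1) 1).flatMap
        (fun r => (PySem.List.pyRange (r * n) (r * n + n) 1).map F)
        = (PySem.List.pyRange (lr * n) ((rr + 1) * n) 1).map F := by
      rw [hk]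
      exact pv_blocks_eq n F (le_of_lt hn0) (rr + 1 - lr).toNat lr
    rw [hblocks]
    by_cases hc : rc - n + 1 = 0
    · rw [if_pos (by simpa using hc)]
      rw [PySem.List.slice_from _ hlc0, pv_drop_map_pyRange]
      congr 1
      apply pv_pyRange_eq_of
      left
      refine ⟨?_, ?_⟩
      · rw [Int.toNat_of_nonneg hlc0]
        linarith
      · linarith
    · rw [if_neg (by simpa using hc)]
      have hrcn1 : rc - n + 1 < 0 := by omega
      set xs := (PySem.List.pyRange (lr * n) ((rr + 1) * n) 1).map F with hxs
      have hlen : xs.length = ((rr + 1) * n - lr * n).toNat := by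
        rw [hxs, List.length_map, PySem.List.length_pyRange_one]
      set M := ((rr + 1) * n - lr * n).toNat with hMdef
      have hM0 : 0 ≤ (rr + 1) * n - lr * n := by
        nlinarith [mul_le_mul_of_nonneg_right (show lr ≤ rr + 1 by omega) (le_of_lt hn0)]
      have hMint : (M : Int) = (rr + 1) * n - lr * n := Int.toNat_of_nonneg hM0
      have hMn : n ≤ (M : Int) := by
        have h2 := mul_le_mul_of_nonneg_right (show (1 : Int) ≤ rr + 1 - lr by omega) (le_of_lt hn0)
        nlinarith [hMint, h2]
      have hA : PySem.List.clampIdx xs.length lc = lc.toNat := by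
        rw [hlen]
        unfold PySem.List.clampIdx
        rw [if_neg (by omega)]
        omega
      have hB : PySem.List.clampIdx xs.length (rc - n + 1) = ((M : Int) + (rc - n + 1)).toNat := by
        rw [hlen]
        unfold PySem.List.clampIdx
        rw [if_pos hrcn1, if_neg (by omega)]
      rw [show PySem.List.slice xs (some lc) (some (rc - n + 1))
            = List.take (PySem.List.clampIdx xs.length (rc - n + 1) - PySem.List.clampIdx xs.length lc)
                (List.drop (PySem.List.clampIdx xs.length lc) xs) from rfl,
        hA, hB, hxs, pv_drop_map_pyRange, pv_take_map_pyRange]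
      congr 1
      apply pv_pyRange_eq_of
      by_cases hlr2 : left ≤ right
      · left
        have hle : lc ≤ (M : Int) + (rc - n + 1) := by linarith [hMint]
        have hKint : ((((M : Int) + (rc - n + 1)).toNat - lc.toNat : Nat) : Int)
            = (M : Int) + (rc - n + 1) - lc := by
          rw [Nat.cast_sub (by omega), Int.toNat_of_nonneg (by omega), Int.toNat_of_nonneg hlc0]
        refine ⟨?_, ?_⟩
        · rw [Int.toNat_of_nonneg hlc0]
          linarith
        · rw [hKint, Int.toNat_of_nonneg hlc0]
          have harg : lr * n + lc + ((M : Int) + (rc - n + 1) - lc) = right + 1 := by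
            linarith [hMint]
          rw [harg]
          exact min_eq_left (by linarith)
      · right
        have heq : lr = rr := by
          have h1 : rr ≤ lr := Int.ediv_le_ediv hn0 (by omega)
          omega
        have hnlr : n * lr = n * rr := by rw [heq]
        have hlcgt : rc < lc := by linarith
        have hMn2 : (M : Int) = n := by rw [hMint, heq]; ring
        have hK0 : ((((M : Int) + (rc - n + 1)).toNat - lc.toNat : Nat)) = 0 := by omega
        rw [hK0]
        refine ⟨?_, by omega⟩
        simp
  · have hnil : PySem.List.pyRange lr (rr + 1) 1 = [] := PySem.List.pyRange_one_eq_nil (by omega)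
    rw [hnil]
    have hBnil : PySem.List.pyRange left (right + 1) 1 = [] := by
      apply PySem.List.pyRange_one_eq_nil
      have h1 : n * (rr + 1) ≤ n * lr := mul_le_mul_of_nonneg_left (by omega) (le_of_lt hn0)
      nlinarith [h1]
    rw [hBnil]
    split <;> simp [PySem.List.slice]
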